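-- pv_equiv track=rewrite | github.com/zeniverse/-algorithm-practice | Programmers/Level1/문자열 나누기(2).py | solution
-- ===== SOURCE A (Python) =====
-- def solution(s):
--     res = 0
--     same = 0
--     diff = 0
--
--     for i in s:
--         if same == diff:
--             res += 1
--             first = i
--
--         if first == i:
--             same += 1
--         else:
--             diff += 1
--
--     return res
-- ===== SOURCE B (Python) =====
-- def cut_group(s, start):
--     """Index just past the first prefix of s[start:] in which the starting
--     character accounts for exactly half the characters (or len(s) if none)."""
--     first = s[start]
--     hits = 0
--     for j in range(start + 1, len(s) + 1):
--         if s[j - 1] == first: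
--             hits += 1
--         if hits * 2 == j - start:
--             return j
--     return len(s)
--
--
-- def solution(s):
--     cuts = []
--     p = 0
--     while p < len(s):
--         p = cut_group(s, p)
--         cuts.append(p)
--     return len(cuts)
-- ===== Notes on version B (the rewrite author's own statement) =====
-- stated objective: alternative
-- what changed: B replaces A's single pass with two running same/diff counters by a staged design: a helper finds each group's cut index as the first window in which the starting character accounts for exactly half the characters, an outer loop collects the list of cut positions, and the answer is the length of that list.
import Mathlib
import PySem

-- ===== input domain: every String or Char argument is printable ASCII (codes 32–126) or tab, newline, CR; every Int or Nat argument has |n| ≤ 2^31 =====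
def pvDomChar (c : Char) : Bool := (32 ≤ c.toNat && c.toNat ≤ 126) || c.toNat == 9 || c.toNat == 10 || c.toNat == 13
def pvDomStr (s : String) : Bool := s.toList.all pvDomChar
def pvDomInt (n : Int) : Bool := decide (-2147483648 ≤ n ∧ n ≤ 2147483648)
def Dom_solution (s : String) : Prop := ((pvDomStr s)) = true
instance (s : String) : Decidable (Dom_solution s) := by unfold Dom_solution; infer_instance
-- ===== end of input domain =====

-- B replaces A's one-pass same/diff counters by a staged design: a helper cuts each group at the
-- first window whose starting character is exactly half of it, an outer loop collects the cut
-- positions, and the answer is the length of that list; alternative decomposition, same cost.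

-- ===== PORT A =====
-- fold state (res, same, diff, first); the initial 'first' is never read since same = diff holds at the first step
def solutionStep (st : Int × Int × Int × Char) (i : Char) : Int × Int × Int × Char :=
  let (res, same, diff, first) := st
  let (res, first) := if same == diff then (res + 1, i) else (res, first)
  if first == i then (res, same + 1, diff, first) else (res, same, diff + 1, first)

def solution (s : String) : Int :=
  (s.toList.foldl solutionStep (0, 0, 0, ' ')).1

-- ===== PORT B =====
-- cut_group's for-loop over j (s[j-1] is the head of the suffix carried in place of the index j-1);
-- returns Python's cut index together with the suffix of s after it: at the end of the string the
-- loop falls through and Python returns len(s) = j - 1, the index just past the last consumed char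
def cutGroup (first : Char) (start : Int) (hits : Int) (j : Int) : List Char → Int × List Char
  | [] => (j - 1, [])
  | c :: rest =>
    let hits' := hits + (if c == first then 1 else 0)
    if hits' * 2 = j - start then (j, rest) else cutGroup first start hits' (j + 1) rest

theorem cutGroup_length_le (first : Char) (start hits j : Int) (l : List Char) :
    (cutGroup first start hits j l).2.length ≤ l.length := by
  induction l generalizing hits j with
  | nil => simp [cutGroup]
  | cons c rest ih =>
    rw [cutGroup]
    by_cases hz : (hits + (if c == first then 1 else 0)) * 2 = j - start
    · rw [if_pos hz]; simp
    · rw [if_neg hz]; exact Nat.le_trans (ih _ _) (Nat.le_succ _)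

-- solution's while-loop: p and the suffix s[p:] walk together; cut_group's j = p + 1 iteration
-- consumes s[p] = first itself and its test 1 * 2 == 1 always fails, so the port enters the scan
-- of the remaining suffix at j = p + 2 with hits = 1 (that first iteration unrolled)
def solGo (p : Int) (cuts : List Int) : List Char → List Int
  | [] => cuts
  | c :: rest =>
    let pr := cutGroup c p 1 (p + 2) rest
    solGo pr.1 (cuts ++ [pr.1]) pr.2
termination_by l => l.length
decreasing_by
  simpa using Nat.lt_succ_of_le (cutGroup_length_le c p 1 (p + 2) rest)

def solution_alt (s : String) : Int := ((solGo 0 [] s.toList).length : Int)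

-- ===== PRECONDITION & SPEC =====
def Spec_solution (s : String) (out : Int) : Prop := out = solution_alt s
instance (s : String) (out : Int) : Decidable (Spec_solution s out) := by unfold Spec_solution; infer_instance

-- ===== CLAIM (what is proved, stated in full; the proofs are below) =====
def Claim_equal_solution : Prop := ∀ (s : String), Dom_solution s → Spec_solution s (solution s)

-- ===== LEMMAS AND PROOFS =====

-- proof-side abstraction of cut_group's scan: only the relative index r = j - start matters;
-- 'some rem' = suffix after the cut, 'none' = the scan ran off the end of the string
def scanGroup (first : Char) (hits : Int) (r : Int) : List Char → Option (List Char)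
  | [] => none
  | c :: rest =>
    let hits' := hits + (if c == first then 1 else 0)
    if hits' * 2 = r then some rest else scanGroup first hits' (r + 1) rest

theorem scanGroup_length_le (first : Char) (hits r : Int) (l rem : List Char)
    (h : scanGroup first hits r l = some rem) : rem.length ≤ l.length := by
  induction l generalizing hits r with
  | nil => simp [scanGroup] at h
  | cons c tl ih =>
    rw [scanGroup] at h
    by_cases hz : (hits + (if c == first then 1 else 0)) * 2 = r
    · rw [if_pos hz] at h; cases h; simp
    · rw [if_neg hz] at h; exact Nat.le_trans (ih _ _ h) (Nat.le_succ _)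

-- proof-side group counter: the value both programs compute
def countG : List Char → Int
  | [] => 0
  | c :: rest =>
    match h : scanGroup c 1 2 rest with
    | some rem => 1 + countG rem
    | none => 1
termination_by l => l.length
decreasing_by
  simpa using Nat.lt_succ_of_le (scanGroup_length_le c 1 2 rest rem h)

theorem countG_nil : countG [] = 0 := by rw [countG]

theorem countG_cons (c : Char) (rest : List Char) :
    countG (c :: rest)
      = match scanGroup c 1 2 rest with
        | some rem => 1 + countG rem
        | none => 1 := by
  rw [countG]
  rcases hscan : scanGroup c 1 2 rest with _ | rem <;> simp only [hscan]

-- cutGroup's suffix component is scanGroup at the relative index r = j - start ([] on fall-through)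
theorem cutGroup_snd (first : Char) (start hits j : Int) (l : List Char) :
    (cutGroup first start hits j l).2
      = match scanGroup first hits (j - start) l with
        | some rem => rem
        | none => [] := by
  induction l generalizing hits j with
  | nil => simp [cutGroup, scanGroup]
  | cons c rest ih =>
    rw [cutGroup, scanGroup]
    by_cases hz : (hits + (if c == first then 1 else 0)) * 2 = j - start
    · rw [if_pos hz, if_pos hz]
    · rw [if_neg hz, if_neg hz, ih]
      have : j + 1 - start = j - start + 1 := by omega
      rw [this]

-- the outer loop adds one cut per group: |solGo p cuts l| = |cuts| + countG l
theorem solGo_length (l : List Char) : ∀ (p : Int) (cuts : List Int),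
    ((solGo p cuts l).length : Int) = (cuts.length : Int) + countG l := by
  induction l using countG.induct with
  | case1 =>
    intro p cuts
    simp [solGo, countG_nil]
  | case2 c rest rem hscan ih =>
    intro p cuts
    rw [solGo, countG_cons]
    have h2 : p + 2 - p = (2 : Int) := by omega
    simp only [cutGroup_snd, h2, hscan]
    rw [ih]
    simp only [List.length_append, List.length_cons, List.length_nil]
    push_cast
    ring
  | case3 c rest hscan =>
    intro p cuts
    rw [solGo, countG_cons]
    have h2 : p + 2 - p = (2 : Int) := by omega
    simp only [cutGroup_snd, h2, hscan]
    rw [solGo]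
    simp only [List.length_append, List.length_cons, List.length_nil]
    push_cast
    ring

-- combined loop invariant for A's fold: at a group boundary (same = diff) the fold counts res plus
-- countG of the rest; mid-group with first f and scan state (hits, r) tied to (same, diff) by
-- 2*hits - r + 1 = same - diff it counts res plus the groups left after the current group
def tailCount (f : Char) (hits r : Int) (l : List Char) : Int :=
  match scanGroup f hits r l with
  | some rem => countG rem
  | none => 0

theorem fold_inv (l : List Char) :
    (∀ (res same : Int) (f : Char),
        (l.foldl solutionStep (res, same, same, f)).1 = res + countG l) ∧
    (∀ (res same diff hits r : Int) (f : Char), same ≠ diff → 2 * hits - r + 1 = same - diff →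
        (l.foldl solutionStep (res, same, diff, f)).1 = res + tailCount f hits r l) := by
  induction l with
  | nil =>
    refine ⟨fun res same f => ?_, fun res same diff hits r f _ _ => ?_⟩
    · simp [countG_nil]
    · simp [tailCount, scanGroup]
  | cons c rest ih =>
    obtain ⟨ihTop, ihMid⟩ := ih
    refine ⟨fun res same f => ?_, fun res same diff hits r f hne hrel => ?_⟩
    · have hstep : solutionStep (res, same, same, f) c = (res + 1, same + 1, same, c) := by
        simp [solutionStep]
      rw [List.foldl_cons, hstep,
        ihMid (res + 1) (same + 1) same 1 2 c (by omega) (by omega),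
        countG_cons, tailCount]
      cases scanGroup c 1 2 rest <;> simp <;> try ring
    · have hsd : (same == diff) = false := by simpa using hne
      by_cases hceq : c = f
      · subst hceq
        have hstep : solutionStep (res, same, diff, c) c = (res, same + 1, diff, c) := by
          simp [solutionStep, hsd]
        rw [List.foldl_cons, hstep]
        simp only [tailCount, scanGroup, beq_self_eq_true, if_true]
        by_cases hz : (hits + 1) * 2 = r
        · rw [if_pos hz]
          have : same + 1 = diff := by omega
          rw [this]
          exact ihTop res diff c
        · rw [if_neg hz]
          exact ihMid res (same + 1) diff (hits + 1) (r + 1) c (by omega) (by omega)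
      · have hbne : (c == f) = false := by simpa using hceq
        have hfne : (f == c) = false := by simpa using Ne.symm hceq
        have hstep : solutionStep (res, same, diff, f) c = (res, same, diff + 1, f) := by
          simp [solutionStep, hsd, hfne]
        rw [List.foldl_cons, hstep]
        simp only [tailCount, scanGroup, hbne, Bool.false_eq_true, if_false, add_zero]
        by_cases hz : hits * 2 = r
        · rw [if_pos hz]
          have : same = diff + 1 := by omega
          rw [this]
          exact ihTop res (diff + 1) f
        · rw [if_neg hz]
          exact ihMid res same (diff + 1) hits (r + 1) f (by omega) (by omega)

-- ===== VERDICT (by name: the statement is the Claim_ definition above) =====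
theorem solution_spec : Claim_equal_solution := by
  intro s _
  unfold Spec_solution solution solution_alt
  rw [(fold_inv s.toList).1 0 0 ' ', solGo_length s.toList 0 []]
  simp
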